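-- pv_equiv track=rewrite | github.com/jjacob15/classic_computer_science | array/04_greedy/reverse_shuffle_merge.py | reverse_shuffle_merge
-- ===== SOURCE A (Python) =====
-- from collections import Counter
--
-- def reverse_shuffle_merge(s):
--
--     freq = {key: value//2 for key, value in Counter(s).items()}
--     solution = []
--     n = len(s)
--
--     while len(solution) < n//2:
--         left_freq = Counter(s)
--         min_char = "~"
--         next_char = {}
--
--         for index in range(len(s)-1,-1,-1):
--             char = s[index]
--             if char not in next_char and freq[char] > 0:
--                 next_char[char] = index
--                 min_char = min(min_char,char)
--
--             left_freq[char] -=1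
--             if left_freq[char] < freq[char]:
--                 break
--
--         solution.append(min_char)
--         freq[min_char] -= 1
--         s = s[:next_char[min_char]]
--
--
--     return "".join(solution)
-- ===== SOURCE B (Python) =====
-- from collections import Counter
--
-- def reverse_shuffle_merge(s):
--     total = Counter(s)
--     avail = Counter(s)
--     taken = Counter()
--     stack = []
--     for c in reversed(s):
--         avail[c] -= 1
--         if taken[c] < total[c] // 2:
--             while stack and c < stack[-1] and taken[stack[-1]] - 1 + avail[stack[-1]] >= total[stack[-1]] // 2:
--                 taken[stack[-1]] -= 1
--                 stack.pop()
--             stack.append(c)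
--             taken[c] += 1
--     return "".join(stack)
-- ===== Notes on version B (the rewrite author's own statement) =====
-- stated objective: faster
-- what changed: B replaces A's restart greedy (which rebuilds Counter(s), rescans and slices the string for every output character) by the classic single-pass monotonic-stack greedy over the reversed string with frequency counts, popping a stack entry only when it can still be re-acquired later.
import Mathlib
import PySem

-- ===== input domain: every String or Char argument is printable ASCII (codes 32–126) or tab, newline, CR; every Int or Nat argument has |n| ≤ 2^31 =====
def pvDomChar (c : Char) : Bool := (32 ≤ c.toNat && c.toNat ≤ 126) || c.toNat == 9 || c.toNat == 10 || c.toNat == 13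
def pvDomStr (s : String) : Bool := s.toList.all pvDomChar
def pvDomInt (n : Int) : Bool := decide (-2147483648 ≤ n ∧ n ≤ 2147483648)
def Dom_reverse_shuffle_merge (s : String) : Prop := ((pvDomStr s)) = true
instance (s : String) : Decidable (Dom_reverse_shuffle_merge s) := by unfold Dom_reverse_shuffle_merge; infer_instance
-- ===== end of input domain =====

-- B replaces A's quadratic restart-scan (Counter(s) rebuilt, string re-sliced and re-scanned
-- for every output character) by the classic single-pass monotonic-stack greedy over the
-- reversed string; measurably faster (O(n) vs O(n^2)).

-- ===== PORT A =====
-- freq = {key: value//2 for key, value in Counter(s).items()}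
def pvFreqInitA (cs : List Char) : PySem.Dict Char Int :=
  (PySem.Dict.counter cs).items.foldl
    (fun d kv => d.insert kv.1 (PySem.Int.floordiv kv.2 2)) PySem.Dict.empty

-- the inner 'for index in range(len(s)-1,-1,-1)' with its break; state = (left_freq, min_char, next_char)
-- s[index]: index always in range here, so pyGetD is exact; min(min_char, char) on 1-char
-- strings is Char min; freq[char]: char occurs in s, and freq holds every char of s, so getD is exact.
def pvScanA (t : List Char) (freq : PySem.Dict Char Int) :
    List Int → PySem.Dict Char Int → Char → PySem.Dict Char Int → Char × PySem.Dict Char Int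
  | [], _, mc, nc => (mc, nc)
  | i :: rest, lf, mc, nc =>
    let ch := PySem.List.pyGetD t i ' '
    let mc' := if nc.contains ch = false ∧ 0 < freq.getD ch 0 then min mc ch else mc
    let nc' := if nc.contains ch = false ∧ 0 < freq.getD ch 0 then nc.insert ch i else nc
    let lf' := lf.modify ch 0 (· - 1)
    if lf'.getD ch 0 < freq.getD ch 0 then (mc', nc')
    else pvScanA t freq rest lf' mc' nc'

-- the outer 'while len(solution) < n//2': each pass appends exactly one char, so it runs
-- exactly n//2 times; fuel = n//2.  'next_char[min_char]' and 'freq[min_char]' raise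
-- KeyError when min_char is absent: that is the 'none' branch (input excluded by Pre_).
def pvLoopA : Nat → List Char → PySem.Dict Char Int → List Char → Option (List Char)
  | 0, _, _, sol => some sol
  | fuel+1, t, freq, sol =>
    let lf := PySem.Dict.counter t
    let r := pvScanA t freq (PySem.List.pyRange ((t.length : Int) - 1) (-1) (-1)) lf '~' PySem.Dict.empty
    match r.2.get? r.1, freq.get? r.1 with
    | some j, some v =>
        pvLoopA fuel (PySem.List.slice t none (some j)) (freq.insert r.1 (v - 1)) (sol ++ [r.1])
    | _, _ => none

def reverse_shuffle_merge (s : String) : String :=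
  let cs := s.toList
  let freq := pvFreqInitA cs
  let n : Int := cs.length
  match pvLoopA (PySem.Int.floordiv n 2).toNat cs freq [] with
  | some sol => String.ofList sol      -- "".join(solution) of 1-char strings
  | none => ""                     -- Python raises KeyError here (outside Pre_)

-- ===== PORT B =====
-- the 'while stack and c < stack[-1] and taken[...]-1+avail[...] >= total[...]//2' pop loop;
-- the stack is kept top-first (head = Python stack[-1]); total/taken/avail are Counters
-- (getD 0), so every dict access is exact.
def pvPopB (total avail : PySem.Dict Char Int) (c : Char) :
    PySem.Dict Char Int → List Char → PySem.Dict Char Int × List Char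
  | taken, [] => (taken, [])
  | taken, t :: rest =>
    if c < t ∧ PySem.Int.floordiv (total.getD t 0) 2 ≤ taken.getD t 0 - 1 + avail.getD t 0
    then pvPopB total avail c (taken.modify t 0 (· - 1)) rest
    else (taken, t :: rest)

-- 'for c in reversed(s): avail[c] -= 1; if taken[c] < total[c] // 2: <pop loop>; push c'
def pvLoopB2 (total : PySem.Dict Char Int) :
    List Char → PySem.Dict Char Int → PySem.Dict Char Int → List Char → List Char
  | [], _, _, stack => stack
  | c :: rest, avail, taken, stack =>
    let avail' := avail.modify c 0 (· - 1)
    if taken.getD c 0 < PySem.Int.floordiv (total.getD c 0) 2 then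
      let tp := pvPopB total avail' c taken stack
      pvLoopB2 total rest avail' (tp.1.modify c 0 (· + 1)) (c :: tp.2)
    else pvLoopB2 total rest avail' taken stack

def reverse_shuffle_merge_alt (s : String) : String :=
  let cs := s.toList
  -- "".join(stack) lists the stack bottom-first: reverse of our top-first representation
  String.ofList (pvLoopB2 (PySem.Dict.counter cs) cs.reverse
    (PySem.Dict.counter cs) PySem.Dict.empty []).reverse

-- ===== PRECONDITION & SPEC =====
-- Pre_ excludes exactly the inputs on which A raises KeyError: strings in which two or
-- more distinct characters occur an odd number of times (then the needed picks exceed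
-- the half-counts and some pass finds no candidate, so next_char[min_char]/freq[min_char]
-- raises).
def Pre_reverse_shuffle_merge (s : String) : Prop :=
  ((PySem.Set.ofList s.toList).countP (fun c => s.toList.count c % 2 == 1)) ≤ 1
instance (s : String) : Decidable (Pre_reverse_shuffle_merge s) := by
  unfold Pre_reverse_shuffle_merge; infer_instance

def pvWitness_reverse_shuffle_merge : String := "abcabc"

def Spec_reverse_shuffle_merge (s : String) (out : String) : Prop := out = reverse_shuffle_merge_alt s
instance (s : String) (out : String) : Decidable (Spec_reverse_shuffle_merge s out) := by
  unfold Spec_reverse_shuffle_merge; infer_instance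

-- ===== CLAIM (what is proved, stated in full; the proofs are below) =====
def Claim_equal_reverse_shuffle_merge : Prop := ∀ (s : String), Dom_reverse_shuffle_merge s → Pre_reverse_shuffle_merge s → Spec_reverse_shuffle_merge s (reverse_shuffle_merge s)


-- ===== LEMMAS AND PROOFS =====

-- abstract candidate update of A's scan: record (char, position) of the best candidate
def pvBestStep (needf : Char → Int) (c : Char) (q : Nat) (best : Option (Char × Nat)) : Option (Char × Nat) :=
  if 0 < needf c ∧ (match best with | none => true | some b => decide (c < b.1)) = true
  then some (c, q) else best

-- abstract form of A's inner scan: chars in scan order, counts as plain functions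
def pvCore (needf : Char → Int) : List Char → (Char → Int) → Option (Char × Nat) → Nat → Option (Char × Nat)
  | [], _, best, _ => best
  | c :: rest, remf, best, q =>
    if remf c - 1 < needf c then pvBestStep needf c q best
    else pvCore needf rest (fun x => if x = c then remf x - 1 else remf x) (pvBestStep needf c q best) (q+1)

def pvDec (need : Char → Int) (c : Char) : Char → Int := fun d => if d = c then need d - 1 else need d

-- abstract restart greedy (the algorithm of A, one abstraction step up)
def gRun (need : Char → Int) : Nat → List Char → Option (List Char)
  | 0, _ => some []
  | f+1, l =>
    match pvCore need l (fun d => ((l.count d : Int))) none 0 with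
    | none => none
    | some cq => (gRun (pvDec need cq.1) f (l.drop (cq.2 + 1))).map (cq.1 :: ·)

-- abstract pop loop of B (stack top-first; taken d = stack.count d)
def aPop (need avail : Char → Int) (c : Char) : List Char → List Char
  | [] => []
  | t :: rest =>
    if c < t ∧ need t ≤ (((t :: rest).count t : Int)) - 1 + avail t
    then aPop need avail c rest else t :: rest

-- abstract single pass of B
def aRun (need : Char → Int) : List Char → (Char → Int) → List Char → List Char
  | [], _, st => st
  | x :: v, avail, st =>
    if ((st.count x : Int)) < need x then
      aRun need v (fun d => if d = x then avail d - 1 else avail d)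
        (x :: aPop need (fun d => if d = x then avail d - 1 else avail d) x st)
    else aRun need v (fun d => if d = x then avail d - 1 else avail d) st

-- no-break condition of A's scan at position j
def pvNB (need : Char → Int) (ℓ : List Char) (j : Nat) : Prop :=
  ∀ (h : j < ℓ.length), need ℓ[j] ≤ (((ℓ.drop (j+1)).count ℓ[j] : Int))

-- what A's scan returns: c = min needed char of the window ℓ[0..W), at its first
-- occurrence q; all positions before the window end satisfy no-break, and if the scan
-- broke (brk) the window's last char is scarce in the remaining suffix
def pvGF (need : Char → Int) (ℓ : List Char) (c : Char) (q W : Nat) (brk : Bool) : Prop :=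
  q < W ∧ W ≤ ℓ.length ∧
  (∀ j, j + 1 < W → pvNB need ℓ j) ∧
  (brk = true → ∃ h : W - 1 < ℓ.length, ¬ need ℓ[W-1] ≤ (((ℓ.drop W).count ℓ[W-1] : Int))) ∧
  (brk = false → W = ℓ.length ∧ ∀ j, j < W → pvNB need ℓ j) ∧
  (∀ j (h : j < ℓ.length), j < W → 0 < need ℓ[j] → c ≤ ℓ[j]) ∧
  (∀ j (h : j < ℓ.length), j < q → ℓ[j] ≠ c) ∧
  ∃ h : q < ℓ.length, ℓ[q] = c ∧ 0 < need c

theorem pvBestStep_eq_none (need : Char → Int) (c : Char) (q : Nat) (best : Option (Char × Nat))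
    (h : pvBestStep need c q best = none) : best = none ∧ ¬ 0 < need c := by
  cases best with
  | none =>
    unfold pvBestStep at h
    by_cases hpos : 0 < need c
    · rw [if_pos ⟨hpos, rfl⟩] at h; cases h
    · exact ⟨rfl, hpos⟩
  | some b0 =>
    unfold pvBestStep at h
    by_cases hc : 0 < need c ∧ decide (c < b0.1) = true
    · rw [if_pos hc] at h; cases h
    · rw [if_neg hc] at h; cases h

theorem pvCore_GF (need : Char → Int) (ℓ : List Char) :
    ∀ (k a : Nat), ℓ.length - a = k → a ≤ ℓ.length →
    ∀ (best : Option (Char × Nat)),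
    (∀ b, best = some b → ∃ h : b.2 < ℓ.length, b.2 < a ∧ ℓ[b.2] = b.1 ∧ 0 < need b.1 ∧
        (∀ j (h' : j < ℓ.length), j < b.2 → ℓ[j] ≠ b.1)) →
    (∀ j (h : j < ℓ.length), j < a → 0 < need ℓ[j] →
        (match best with | none => False | some b => b.1 ≤ ℓ[j])) →
    (∀ j, j < a → pvNB need ℓ j) →
    ∀ c q, pvCore need (ℓ.drop a) (fun d => (((ℓ.drop a).count d : Int))) best a = some (c, q) →
      ∃ W brk, pvGF need ℓ c q W brk := by
  intro k
  induction k with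
  | zero =>
    intro a hk ha best Hbest Hmin HNB c q h
    have haa : a = ℓ.length := by omega
    rw [haa, List.drop_length] at h
    simp only [pvCore] at h
    obtain ⟨hlt, hlta, hget, hneed, hfirst⟩ := Hbest (c, q) h
    refine ⟨ℓ.length, false, ?_, by omega, ?_, ?_, ?_, ?_, ?_, ?_⟩
    · omega
    · intro j hj; exact HNB j (by omega)
    · intro hfalse; cases hfalse
    · intro _; exact ⟨rfl, fun j hj => HNB j (by omega)⟩
    · intro j hj hjW hpos
      have := Hmin j hj (by omega) hpos
      rw [h] at this
      exact this
    · intro j hj hjq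
      exact hfirst j hj hjq
    · exact ⟨hlt, hget, hneed⟩
  | succ k ih =>
    intro a hk ha best Hbest Hmin HNB c q h
    have halt : a < ℓ.length := by omega
    have hdrop : ℓ.drop a = ℓ[a] :: ℓ.drop (a+1) := List.drop_eq_getElem_cons halt
    -- count bookkeeping
    have hcnt : ∀ d, (((ℓ[a] :: ℓ.drop (a+1)).count d : Int)) =
        (((ℓ.drop (a+1)).count d : Int)) + (if d = ℓ[a] then 1 else 0) := by
      intro d
      rw [List.count_cons]
      by_cases hd : d = ℓ[a]
      · simp [hd]
      · have hne : ¬ ℓ[a] = d := fun h => hd h.symm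
        simp [hd, hne]
    -- facts about the updated best
    have Hbest' : ∀ b, pvBestStep need ℓ[a] a best = some b →
        ∃ h : b.2 < ℓ.length, b.2 < a + 1 ∧ ℓ[b.2] = b.1 ∧ 0 < need b.1 ∧
          (∀ j (h' : j < ℓ.length), j < b.2 → ℓ[j] ≠ b.1) := by
      intro b hb
      unfold pvBestStep at hb
      cases hb0 : best with
      | none =>
        rw [hb0] at hb
        by_cases hpos : 0 < need ℓ[a]
        · rw [if_pos ⟨hpos, rfl⟩] at hb
          cases hb
          refine ⟨halt, by omega, rfl, hpos, ?_⟩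
          intro j hj hja heq
          have hposj : 0 < need ℓ[j] := by rw [heq]; exact hpos
          have hm := Hmin j hj hja hposj
          rw [hb0] at hm; exact hm
        · rw [if_neg (fun hc => hpos hc.1)] at hb; cases hb
      | some b0 =>
        rw [hb0] at hb
        by_cases hc : 0 < need ℓ[a] ∧ decide (ℓ[a] < b0.1) = true
        · rw [if_pos hc] at hb
          cases hb
          refine ⟨halt, by omega, rfl, hc.1, ?_⟩
          intro j hj hja heq
          have hposj : 0 < need ℓ[j] := by rw [heq]; exact hc.1
          have hm := Hmin j hj hja hposj
          rw [hb0] at hm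
          rw [heq] at hm
          have hlt' : ℓ[a] < b0.1 := by simpa using hc.2
          exact absurd (lt_of_lt_of_le hlt' hm) (lt_irrefl _)
        · rw [if_neg hc] at hb
          cases hb
          obtain ⟨hl, h1, h2, h3, h4⟩ := Hbest _ hb0
          exact ⟨hl, by omega, h2, h3, h4⟩
    have Hmin' : ∀ j (hj : j < ℓ.length), j < a + 1 → 0 < need ℓ[j] →
        (match pvBestStep need ℓ[a] a best with | none => False | some b => b.1 ≤ ℓ[j]) := by
      intro j hj hja hpos
      unfold pvBestStep
      cases hb0 : best with
      | none =>
        by_cases hcase : j < a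
        · have hm := Hmin j hj hcase hpos; rw [hb0] at hm; exact hm.elim
        · have hja' : j = a := by omega
          subst hja'
          rw [if_pos ⟨hpos, rfl⟩]
      | some b0 =>
        by_cases hc : 0 < need ℓ[a] ∧ decide (ℓ[a] < b0.1) = true
        · rw [if_pos hc]
          show ℓ[a] ≤ ℓ[j]
          by_cases hcase : j < a
          · have hm := Hmin j hj hcase hpos; rw [hb0] at hm
            exact le_trans (le_of_lt (by simpa using hc.2)) hm
          · have hja' : j = a := by omega
            subst hja'; exact le_refl _
        · rw [if_neg hc]
          show b0.1 ≤ ℓ[j]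
          by_cases hcase : j < a
          · have hm := Hmin j hj hcase hpos; rw [hb0] at hm; exact hm
          · have hja' : j = a := by omega
            subst hja'
            have hnl : ¬ ℓ[j] < b0.1 := fun hlt' => hc ⟨hpos, by simpa using hlt'⟩
            exact le_of_not_gt hnl
    rw [hdrop] at h
    simp only [pvCore] at h
    split at h
    · -- break at position a: window is ℓ[0..a]
      rename_i hbr
      have hscar : ¬ need ℓ[a] ≤ (((ℓ.drop (a+1)).count ℓ[a] : Int)) := by
        have hc := hcnt ℓ[a]
        rw [if_pos rfl] at hc
        omega
      obtain ⟨hl, h1, h2, h3, h4⟩ := Hbest' (c, q) h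
      refine ⟨a + 1, true, by omega, by omega, ?_, ?_, ?_, ?_, ?_, ?_⟩
      · intro j hj; exact HNB j (by omega)
      · intro _
        refine ⟨by simpa using halt, by simpa using hscar⟩
      · intro hfalse; cases hfalse
      · intro j hj hjW hpos
        have := Hmin' j hj hjW hpos
        rw [h] at this
        exact this
      · intro j hj hjq; exact h4 j hj hjq
      · exact ⟨hl, h2, h3⟩
    · -- no break: recurse at a+1
      rename_i hbr
      have HNB' : ∀ j, j < a + 1 → pvNB need ℓ j := by
        intro j hj
        by_cases hcase : j < a
        · exact HNB j hcase
        · have hja : j = a := by omega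
          subst hja
          intro h'
          have hc := hcnt ℓ[j]
          rw [if_pos rfl] at hc
          omega
      have hfun : (fun x => if x = ℓ[a] then (fun d => (((ℓ[a] :: ℓ.drop (a+1)).count d : Int))) x - 1
            else (fun d => (((ℓ[a] :: ℓ.drop (a+1)).count d : Int))) x)
          = (fun d => (((ℓ.drop (a+1)).count d : Int))) := by
        funext d
        have hc := hcnt d
        simp only
        by_cases hd : d = ℓ[a]
        · simp only [if_pos hd] at hc ⊢; omega
        · simp only [if_neg hd] at hc ⊢; omega
      rw [hfun] at h
      exact ih (a+1) (by omega) (by omega) _ Hbest' Hmin' HNB' c q h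

theorem pvCore_none (need : Char → Int) :
    ∀ (v : List Char) (remf : Char → Int), (∀ d, remf d = ((v.count d : Int))) →
    ∀ (best : Option (Char × Nat)) (q0 : Nat),
    pvCore need v remf best q0 = none → best = none ∧ ∀ x ∈ v, ¬ 0 < need x := by
  intro v
  induction v with
  | nil =>
    intro remf hrem best q0 h
    simp only [pvCore] at h
    exact ⟨h, by simp⟩
  | cons x rest ih =>
    intro remf hrem best q0 h
    simp only [pvCore] at h
    split at h
    · rename_i hbr
      obtain ⟨hb, hnx⟩ := pvBestStep_eq_none need x q0 best h
      have hrx : remf x = (((x :: rest).count x : Int)) := hrem x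
      rw [List.count_cons_self] at hrx
      have hx1 : (1 : Int) ≤ remf x := by
        rw [hrx]; push_cast; omega
      omega
    · have hrem' : ∀ d, (if d = x then remf d - 1 else remf d) = ((rest.count d : Int)) := by
        intro d
        have ht := hrem d
        rw [List.count_cons] at ht
        by_cases hd : d = x
        · rw [if_pos hd]
          subst hd
          simp at ht
          omega
        · rw [if_neg hd]
          have hne : (x == d) = false := beq_eq_false_iff_ne.mpr (fun h => hd h.symm)
          rw [hne] at ht
          simpa using ht
      obtain ⟨hb', hall⟩ := ih _ hrem' _ _ h
      obtain ⟨hb, hnx⟩ := pvBestStep_eq_none need x q0 best hb'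
      refine ⟨hb, ?_⟩
      intro y hy
      rcases List.mem_cons.mp hy with hy | hy
      · subst hy; exact hnx
      · exact hall y hy

theorem pvSUF (need : Char → Int) (ℓ : List Char) (hle : ∀ d, need d ≤ ((ℓ.count d : Int))) :
    ∀ m, m ≤ ℓ.length → (∀ j, j < m → pvNB need ℓ j) →
    ∀ d, need d ≤ (((ℓ.drop m).count d : Int)) := by
  intro m
  induction m with
  | zero => intro _ _ d; simpa using hle d
  | succ m ih =>
    intro hm hnb d
    have hm' : m < ℓ.length := by omega
    have hdrop : ℓ.drop m = ℓ[m] :: ℓ.drop (m+1) := List.drop_eq_getElem_cons hm'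
    by_cases hd : d = ℓ[m]
    · subst hd
      exact (hnb m (by omega)) hm'
    · have hih := ih (by omega) (fun j hj => hnb j (by omega)) d
      rw [hdrop, List.count_cons] at hih
      have hne : (ℓ[m] == d) = false := beq_eq_false_iff_ne.mpr (fun h => hd h.symm)
      rw [hne] at hih
      simpa using hih

theorem pvCount_cons_ne (u d : Char) (l : List Char) (h : u ≠ d) :
    (u :: l).count d = l.count d := by
  rw [List.count_cons]
  have hne : (u == d) = false := beq_eq_false_iff_ne.mpr h
  rw [hne]
  simp

theorem aPop_mem (need avail : Char → Int) (c : Char) :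
    ∀ (st : List Char) (t : Char), t ∈ aPop need avail c st → t ∈ st := by
  intro st
  induction st with
  | nil => intro t ht; simpa [aPop] using ht
  | cons u rest ih =>
    intro t ht
    simp only [aPop] at ht
    split at ht
    · exact List.mem_cons_of_mem u (ih t ht)
    · exact ht

theorem aPop_count_x (need avail : Char → Int) (c : Char) :
    ∀ (st : List Char), (aPop need avail c st).count c = st.count c := by
  intro st
  induction st with
  | nil => rfl
  | cons u rest ih =>
    simp only [aPop]
    split
    · rename_i hcond
      have hne : u ≠ c := fun h => lt_irrefl c (h ▸ hcond.1)
      rw [ih, pvCount_cons_ne u c rest hne]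
    · rfl

theorem aPop_inv (need avail : Char → Int) (c x : Char) :
    ∀ (st : List Char), (∀ d, d ≠ x → need d ≤ ((st.count d : Int)) + avail d) →
    ∀ d, d ≠ x → need d ≤ (((aPop need avail c st).count d : Int)) + avail d := by
  intro st
  induction st with
  | nil => exact fun h => h
  | cons u rest ih =>
    intro hinv d hd
    simp only [aPop]
    split
    · rename_i hcond
      refine ih ?_ d hd
      intro d' hd'
      by_cases hdu : d' = u
      · subst hdu
        have := hcond.2
        rw [List.count_cons_self] at this
        push_cast at this ⊢
        omega
      · have := hinv d' hd'
        rw [pvCount_cons_ne u d' rest (fun h => hdu h.symm)] at this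
        exact this
    · exact hinv d hd

theorem aRun_append (need : Char → Int) :
    ∀ (u v : List Char) (avail : Char → Int) (st : List Char),
    aRun need (u ++ v) avail st
      = aRun need v (fun d => avail d - ((u.count d : Int))) (aRun need u avail st) := by
  intro u
  induction u with
  | nil =>
    intro v avail st
    simp only [List.nil_append, aRun]
    congr 1
    funext d; simp
  | cons x u ih =>
    intro v avail st
    simp only [List.cons_append, aRun]
    have hfun : (fun d => (if d = x then avail d - 1 else avail d) - ((u.count d : Int)))
        = fun d => avail d - (((x :: u).count d : Int)) := by
      funext d
      rw [List.count_cons]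
      by_cases hd : d = x
      · subst hd
        simp only [if_pos rfl, beq_self_eq_true, if_pos]
        push_cast
        ring
      · have hne : (x == d) = false := beq_eq_false_iff_ne.mpr (fun h => hd h.symm)
        rw [hne, if_neg hd]
        simp
    by_cases hpush : ((st.count x : Int)) < need x
    · rw [if_pos hpush, ih]
      rw [hfun]
      congr 1
      rw [if_pos hpush]
    · rw [if_neg hpush, ih]
      rw [hfun]
      congr 1
      rw [if_neg hpush]

theorem aRun_skip (need : Char → Int) :
    ∀ (v : List Char) (avail : Char → Int) (st : List Char),
    (∀ x ∈ v, need x ≤ 0) → aRun need v avail st = st := by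
  intro v
  induction v with
  | nil => intro avail st _; rfl
  | cons x v ih =>
    intro avail st h
    simp only [aRun]
    rw [if_neg (by
      have := h x List.mem_cons_self
      have hc : (0:Int) ≤ ((st.count x : Int)) := by positivity
      omega)]
    exact ih _ st (fun y hy => h y (List.mem_cons_of_mem x hy))

theorem pvPreserve (need : Char → Int) (ℓ : List Char) (c : Char) (q W : Nat) (brk : Bool)
    (hGF : pvGF need ℓ c q W brk) (hle : ∀ d, need d ≤ ((ℓ.count d : Int))) :
    ∀ d, pvDec need c d ≤ (((ℓ.drop (q+1)).count d : Int)) := by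
  obtain ⟨hqW, hWlen, hNB, hbrk, hnobrk, hmin, hfirst, hq, hgetq, hposc⟩ := hGF
  have hsuf := pvSUF need ℓ hle q (by omega) (fun j hj => hNB j (by omega))
  have hdropq : ℓ.drop q = c :: ℓ.drop (q+1) := by
    rw [List.drop_eq_getElem_cons hq, hgetq]
  intro d
  by_cases hd : d = c
  · subst hd
    have hs := hsuf d
    rw [hdropq, List.count_cons_self] at hs
    unfold pvDec
    rw [if_pos rfl]
    push_cast at hs ⊢
    omega
  · have hs := hsuf d
    rw [hdropq, pvCount_cons_ne c d _ (fun h => hd h.symm)] at hs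
    unfold pvDec
    rw [if_neg hd]
    exact hs

theorem pvPopAll (need avail : Char → Int) (c : Char) :
    ∀ st : List Char, (∀ t ∈ st, c < t ∧ need t ≤ avail t) → aPop need avail c st = [] := by
  intro st
  induction st with
  | nil => intro _; rfl
  | cons u rest ih =>
    intro h
    obtain ⟨hcu, hau⟩ := h u List.mem_cons_self
    simp only [aPop]
    rw [if_pos ⟨hcu, by rw [List.count_cons_self]; push_cast; omega⟩]
    exact ih (fun t ht => h t (List.mem_cons_of_mem u ht))

theorem pvWalk (need : Char → Int) (ℓ : List Char) (c : Char) (q W : Nat) (brk : Bool)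
    (hGF : pvGF need ℓ c q W brk) :
    ∀ k, k ≤ q → ∀ t ∈ aRun need (ℓ.take k) (fun d => ((ℓ.count d : Int))) [], c < t := by
  obtain ⟨hqW, hWlen, hNB, hbrk, hnobrk, hmin, hfirst, hq, hgetq, hposc⟩ := hGF
  intro k
  induction k with
  | zero => intro _ t ht; simp [aRun] at ht
  | succ k ih =>
    intro hk t ht
    have hklen : k < ℓ.length := by omega
    have htake : ℓ.take (k+1) = ℓ.take k ++ [ℓ[k]] := by
      rw [List.take_succ, List.getElem?_eq_getElem hklen]
      rfl
    rw [htake, aRun_append] at ht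
    simp only [aRun] at ht
    split at ht
    · rename_i hpush
      rcases List.mem_cons.mp ht with h1 | h1
      · subst h1
        have hpos : 0 < need ℓ[k] := by
          have hnn : (0:Int) ≤ (((aRun need (ℓ.take k) (fun d => ((ℓ.count d : Int))) []).count ℓ[k] : Int)) := by positivity
          omega
        have hle' : c ≤ ℓ[k] := hmin k hklen (by omega) hpos
        have hne : ℓ[k] ≠ c := hfirst k hklen (by omega)
        exact lt_of_le_of_ne hle' (fun h => hne h.symm)
      · exact ih (by omega) t (aPop_mem _ _ _ _ t h1)
    · exact ih (by omega) t ht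

theorem pvS1 (need : Char → Int) (ℓ : List Char) (c : Char) (q W : Nat) (brk : Bool)
    (hGF : pvGF need ℓ c q W brk) (hle : ∀ d, need d ≤ ((ℓ.count d : Int))) :
    aRun need (ℓ.take (q+1)) (fun d => ((ℓ.count d : Int))) [] = [c] := by
  obtain ⟨hqW, hWlen, hNB, hbrk, hnobrk, hmin, hfirst, hq, hgetq, hposc⟩ := hGF
  have hsuf := pvSUF need ℓ hle q (by omega) (fun j hj => hNB j (by omega))
  have htake : ℓ.take (q+1) = ℓ.take q ++ [c] := by
    rw [List.take_succ, List.getElem?_eq_getElem hq, hgetq]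
    rfl
  rw [htake, aRun_append]
  have hall : ∀ t ∈ aRun need (ℓ.take q) (fun d => ((ℓ.count d : Int))) [], c < t :=
    pvWalk need ℓ c q W brk ⟨hqW, hWlen, hNB, hbrk, hnobrk, hmin, hfirst, hq, hgetq, hposc⟩ q (le_refl q)
  have hAv : (fun d => ((ℓ.count d : Int)) - (((ℓ.take q).count d : Int)))
      = fun d => (((ℓ.drop q).count d : Int)) := by
    funext d
    have hsp : ℓ.count d = (ℓ.take q).count d + (ℓ.drop q).count d := by
      rw [← List.count_append, List.take_append_drop]
    push_cast [hsp]
    ring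
  rw [hAv]
  simp only [aRun]
  set st0 := aRun need (ℓ.take q) (fun d => ((ℓ.count d : Int))) [] with hst0
  have hc0 : st0.count c = 0 := by
    rw [List.count_eq_zero]
    intro hmem
    exact lt_irrefl c (hall c hmem)
  rw [hc0]
  rw [if_pos (by exact_mod_cast hposc)]
  have hpop : aPop need (fun d => if d = c then (((ℓ.drop q).count d : Int)) - 1
      else (((ℓ.drop q).count d : Int))) c st0 = [] := by
    apply pvPopAll
    intro t ht
    have hct := hall t ht
    refine ⟨hct, ?_⟩
    rw [if_neg (fun h => absurd hct (by rw [h]; exact lt_irrefl c))]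
    exact hsuf t
  rw [hpop]

theorem pvPopAlign (need : Char → Int) (ℓ : List Char) (c : Char) (q W : Nat) (brk : Bool)
    (hGF : pvGF need ℓ c q W brk) (g : Nat) (hgq : q + 1 ≤ g) (hglen : g < ℓ.length)
    (hxpos : ℓ[g] < c → 0 < need ℓ[g]) :
    ∀ (st : List Char),
    (∀ d, d ≠ ℓ[g] → need d ≤ (((st ++ [c]).count d : Int)) + (((ℓ.drop (g+1)).count d : Int))) →
    aPop need (fun d => (((ℓ.drop (g+1)).count d : Int))) ℓ[g] (st ++ [c])
      = aPop (pvDec need c) (fun d => (((ℓ.drop (g+1)).count d : Int))) ℓ[g] st ++ [c] := by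
  obtain ⟨hqW, hWlen, hNB, hbrk, hnobrk, hmin, hfirst, hq, hgetq, hposc⟩ := hGF
  intro st
  induction st with
  | nil =>
    intro hinv
    simp only [List.nil_append, aPop]
    by_cases hxc : ℓ[g] < c
    · have hpos := hxpos hxc
      have hgW : W ≤ g := by
        by_contra h'
        push_neg at h'
        exact absurd (hmin g hglen h' hpos) (not_le.mpr hxc)
      have hbrk' : brk = true := by
        cases brk with
        | false => obtain ⟨hWl, _⟩ := hnobrk rfl; omega
        | true => rfl
      obtain ⟨hWlt, hscar⟩ := hbrk hbrk'
      have hcntle : (((ℓ.drop (g+1)).count ℓ[W-1] : Int)) ≤ (((ℓ.drop W).count ℓ[W-1] : Int)) := by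
        have hdd : ℓ.drop (g+1) = (ℓ.drop W).drop (g+1-W) := by
          rw [List.drop_drop]
          congr 1
          omega
        rw [hdd]
        exact_mod_cast (List.drop_sublist (g+1-W) (ℓ.drop W)).count_le ℓ[W-1]
      have hbpos : 0 < need ℓ[W-1] := by
        by_contra hnp
        push_neg at hnp
        apply hscar
        have hnn : (0:Int) ≤ (((ℓ.drop W).count ℓ[W-1] : Int)) := by positivity
        omega
      have hbge : c ≤ ℓ[W-1] := hmin (W-1) hWlt (by omega) hbpos
      by_cases hbc : ℓ[W-1] = c
      · have hcfail : ¬ (ℓ[g] < c ∧ need c ≤ ((([c] : List Char).count c : Int)) - 1 + (((ℓ.drop (g+1)).count c : Int))) := by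
          intro hcond
          apply hscar
          rw [hbc]
          have h2 := hcond.2
          have hc1 : (([c] : List Char).count c : Int) = 1 := by simp
          rw [hbc] at hcntle
          omega
        rw [if_neg hcfail]
      · exfalso
        have hbx : ℓ[W-1] ≠ ℓ[g] := by
          intro h
          rw [h] at hbge
          exact absurd hxc (not_lt.mpr hbge)
        have hiv := hinv ℓ[W-1] hbx
        have hnm : ℓ[W-1] ∉ ([] ++ [c] : List Char) := by
          simp only [List.nil_append, List.mem_singleton]
          exact hbc
        have hc0 : ((([] ++ [c] : List Char).count ℓ[W-1] : Int)) = 0 := by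
          rw [List.count_eq_zero.mpr hnm]
          simp
        rw [hc0] at hiv
        apply hscar
        omega
    · rw [if_neg (fun hcond => hxc hcond.1)]
  | cons u rest ih =>
    intro hinv
    simp only [List.cons_append, aPop]
    have hsplit : (((u :: (rest ++ [c])).count u : Int))
        = (((u :: rest).count u : Int)) + (if c = u then 1 else 0) := by
      rw [List.count_cons_self, List.count_append, List.count_cons_self]
      by_cases hcu : c = u
      · subst hcu; simp
      · have hnm : u ∉ ([c] : List Char) := by
          simp only [List.mem_singleton]
          exact fun h => hcu h.symm
        have hz : (([c] : List Char).count u : Int) = 0 := by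
          rw [List.count_eq_zero.mpr hnm]
          simp
        rw [if_neg hcu]
        push_cast at hz ⊢
        omega
    have hneedu : need u = pvDec need c u + (if c = u then 1 else 0) := by
      unfold pvDec
      by_cases hcu : c = u
      · rw [if_pos (hcu.symm), if_pos hcu]; ring
      · rw [if_neg (fun h => hcu h.symm), if_neg hcu]; ring
    by_cases hcond : ℓ[g] < u ∧ pvDec need c u ≤ (((u :: rest).count u : Int)) - 1 + (((ℓ.drop (g+1)).count u : Int))
    · have hcondF : ℓ[g] < u ∧ need u ≤ (((u :: (rest ++ [c])).count u : Int)) - 1 + (((ℓ.drop (g+1)).count u : Int)) := by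
        refine ⟨hcond.1, ?_⟩
        have h2 := hcond.2
        rw [hsplit, hneedu]
        omega
      rw [if_pos hcondF, if_pos hcond]
      apply ih
      intro d hd
      by_cases hdu : d = u
      · subst hdu
        have h2 := hcondF.2
        rw [List.count_cons_self] at h2
        push_cast at h2 ⊢
        omega
      · have := hinv d hd
        rw [List.cons_append, pvCount_cons_ne u d _ (fun h => hdu h.symm)] at this
        exact this
    · have hcondF : ¬ (ℓ[g] < u ∧ need u ≤ (((u :: (rest ++ [c])).count u : Int)) - 1 + (((ℓ.drop (g+1)).count u : Int))) := by
        intro hc'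
        apply hcond
        refine ⟨hc'.1, ?_⟩
        have h2 := hc'.2
        rw [hsplit, hneedu] at h2
        omega
      rw [if_neg hcondF, if_neg hcond]
      rfl

theorem pvS2 (need : Char → Int) (ℓ : List Char) (c : Char) (q W : Nat) (brk : Bool)
    (hGF : pvGF need ℓ c q W brk) :
    ∀ (k g : Nat), ℓ.length - g = k → q + 1 ≤ g → ∀ (st : List Char),
    (∀ d, need d ≤ (((st ++ [c]).count d : Int)) + (((ℓ.drop g).count d : Int))) →
    aRun need (ℓ.drop g) (fun d => (((ℓ.drop g).count d : Int))) (st ++ [c])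
      = aRun (pvDec need c) (ℓ.drop g) (fun d => (((ℓ.drop g).count d : Int))) st ++ [c] := by
  intro k
  induction k with
  | zero =>
    intro g hk hgq st hinv
    have hnil : ℓ.drop g = [] := List.drop_eq_nil_of_le (by omega)
    rw [hnil]
    rfl
  | succ k ih =>
    intro g hk hgq st hinv
    have hg : g < ℓ.length := by omega
    have hdropg : ℓ.drop g = ℓ[g] :: ℓ.drop (g+1) := List.drop_eq_getElem_cons hg
    rw [hdropg]
    simp only [aRun]
    have hAv : (fun d => if d = ℓ[g] then (((ℓ[g] :: ℓ.drop (g+1)).count d : Int)) - 1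
          else (((ℓ[g] :: ℓ.drop (g+1)).count d : Int)))
        = fun d => (((ℓ.drop (g+1)).count d : Int)) := by
      funext d
      by_cases hd : d = ℓ[g]
      · subst hd
        rw [if_pos rfl, List.count_cons_self]
        push_cast
        ring
      · rw [if_neg hd, pvCount_cons_ne ℓ[g] d _ (fun h => hd h.symm)]
    rw [hAv]
    have hshift : (((st ++ [c]).count ℓ[g] : Int)) = ((st.count ℓ[g] : Int)) + (if ℓ[g] = c then 1 else 0) := by
      rw [List.count_append]
      by_cases hxc' : ℓ[g] = c
      · rw [if_pos hxc', hxc']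
        simp
      · have hnm : ℓ[g] ∉ ([c] : List Char) := by
          simp only [List.mem_singleton]
          exact hxc'
        have hz : (([c] : List Char).count ℓ[g] : Int) = 0 := by
          rw [List.count_eq_zero.mpr hnm]
          simp
        rw [if_neg hxc']
        push_cast at hz ⊢
        omega
    have hneedx : need ℓ[g] = pvDec need c ℓ[g] + (if ℓ[g] = c then 1 else 0) := by
      unfold pvDec
      by_cases hxc' : ℓ[g] = c
      · rw [if_pos hxc', if_pos hxc']; ring
      · rw [if_neg hxc', if_neg hxc']; ring
    by_cases hel : ((st.count ℓ[g] : Int)) < pvDec need c ℓ[g]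
    · have helF : (((st ++ [c]).count ℓ[g] : Int)) < need ℓ[g] := by
        rw [hshift, hneedx]; omega
      rw [if_pos helF, if_pos hel]
      have hxpos : ℓ[g] < c → 0 < need ℓ[g] := by
        intro hxc
        have hne : ℓ[g] ≠ c := ne_of_lt hxc
        unfold pvDec at hel
        rw [if_neg hne] at hel
        have hnn : (0:Int) ≤ ((st.count ℓ[g] : Int)) := by positivity
        omega
      have hinv' : ∀ d, d ≠ ℓ[g] → need d ≤ (((st ++ [c]).count d : Int)) + (((ℓ.drop (g+1)).count d : Int)) := by
        intro d hd
        have hbase := hinv d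
        rw [hdropg, pvCount_cons_ne ℓ[g] d _ (fun h => hd h.symm)] at hbase
        exact hbase
      rw [pvPopAlign need ℓ c q W brk hGF g hgq hg hxpos st hinv']
      rw [← List.cons_append]
      apply ih (g+1) (by omega) (by omega)
      intro d
      by_cases hdx : d = ℓ[g]
      · subst hdx
        have hPc : (aPop (pvDec need c) (fun d' => (((ℓ.drop (g+1)).count d' : Int))) ℓ[g] st).count ℓ[g] = st.count ℓ[g] :=
          aPop_count_x _ _ _ st
        have hbase := hinv ℓ[g]
        rw [hdropg, List.count_cons_self] at hbase
        rw [List.count_append, List.count_cons_self, hPc]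
        rw [List.count_append] at hbase
        push_cast at hbase ⊢
        omega
      · have hfull := aPop_inv need (fun d' => (((ℓ.drop (g+1)).count d' : Int))) ℓ[g] ℓ[g] (st ++ [c]) hinv' d hdx
        rw [pvPopAlign need ℓ c q W brk hGF g hgq hg hxpos st hinv'] at hfull
        rw [List.cons_append, pvCount_cons_ne ℓ[g] d _ (fun h => hdx h.symm)]
        exact hfull
    · have helF : ¬ (((st ++ [c]).count ℓ[g] : Int)) < need ℓ[g] := by
        rw [hshift, hneedx]; omega
      rw [if_neg helF, if_neg hel]
      apply ih (g+1) (by omega) (by omega)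
      intro d
      by_cases hdx : d = ℓ[g]
      · subst hdx
        have hnn : (0:Int) ≤ (((ℓ.drop (g+1)).count ℓ[g] : Int)) := by positivity
        omega
      · have hbase := hinv d
        rw [hdropg, pvCount_cons_ne ℓ[g] d _ (fun h => hdx h.symm)] at hbase
        exact hbase

theorem pvTot_exists (need : Char → Int) (l : List Char)
    (hpos : 0 < ∑ d ∈ l.toFinset, need d) :
    ∃ x ∈ l, 0 < need x := by
  by_contra hall
  push_neg at hall
  have hle0 : ∑ d ∈ l.toFinset, need d ≤ 0 :=
    Finset.sum_nonpos (fun d hd => hall d (List.mem_toFinset.mp hd))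
  omega

theorem pvTotStep (need : Char → Int) (l : List Char) (c : Char) (q : Nat)
    (hnn : ∀ d, 0 ≤ need d) (hposc : 0 < need c)
    (hpre : ∀ d, pvDec need c d ≤ (((l.drop (q+1)).count d : Int)))
    (hcl : c ∈ l) :
    ∑ d ∈ (l.drop (q+1)).toFinset, pvDec need c d = (∑ d ∈ l.toFinset, need d) - 1 := by
  have hsub : (l.drop (q+1)).toFinset ⊆ l.toFinset := by
    intro d hd
    exact List.mem_toFinset.mpr (List.mem_of_mem_drop (List.mem_toFinset.mp hd))
  have h1 : ∑ d ∈ (l.drop (q+1)).toFinset, pvDec need c d = ∑ d ∈ l.toFinset, pvDec need c d := by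
    apply Finset.sum_subset hsub
    intro d hdl hdnotin
    have h0 : (l.drop (q+1)).count d = 0 := by
      rw [List.count_eq_zero]
      exact fun hm => hdnotin (List.mem_toFinset.mpr hm)
    have hp := hpre d
    rw [h0] at hp
    have hnn' : 0 ≤ pvDec need c d := by
      unfold pvDec
      by_cases hd : d = c
      · rw [if_pos hd, hd]; omega
      · rw [if_neg hd]; exact hnn d
    simp at hp
    omega
  rw [h1]
  have h2 : ∀ d ∈ l.toFinset, pvDec need c d = need d - (if d = c then 1 else 0) := by
    intro d _
    unfold pvDec
    by_cases hd : d = c <;> simp [hd]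
  rw [Finset.sum_congr rfl h2, Finset.sum_sub_distrib]
  congr 1
  rw [Finset.sum_ite_eq' l.toFinset c (fun _ => (1:Int))]
  simp [List.mem_toFinset.mpr hcl]

theorem pvMain : ∀ (f : Nat) (need : Char → Int) (l : List Char),
    (∀ d, 0 ≤ need d) → (∀ d, need d ≤ ((l.count d : Int))) →
    ((∑ d ∈ l.toFinset, need d) = (f : Int)) →
    gRun need f l = some ((aRun need l (fun d => ((l.count d : Int))) []).reverse) := by
  intro f
  induction f with
  | zero =>
    intro need l hnn hle htot
    have hz : ∀ x ∈ l, need x ≤ 0 := by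
      intro x hx
      have h0 := (Finset.sum_eq_zero_iff_of_nonneg (fun d _ => hnn d)).mp
        (by rw [htot]; simp) x (List.mem_toFinset.mpr hx)
      omega
    rw [aRun_skip need l _ [] hz]
    rfl
  | succ f ih =>
    intro need l hnn hle htot
    obtain ⟨x0, hx0l, hx0⟩ := pvTot_exists need l (by rw [htot]; exact_mod_cast Nat.succ_pos f)
    rcases hres : pvCore need l (fun d => ((l.count d : Int))) none 0 with _ | ⟨c, q⟩
    · exfalso
      obtain ⟨_, hall⟩ := pvCore_none need l _ (fun d => rfl) none 0 hres
      exact hall x0 hx0l hx0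
    · obtain ⟨W, brk, hGF⟩ := pvCore_GF need l l.length 0 rfl (Nat.zero_le _) none
        (fun b hb => nomatch hb)
        (fun j h hj _ => absurd hj (Nat.not_lt_zero j))
        (fun j hj => absurd hj (Nat.not_lt_zero j))
        c q (by simpa only [List.drop_zero] using hres)
      have hGF2 := hGF
      obtain ⟨hqW, hWlen, hNB, hbrk, hnobrk, hmin, hfirst, hq, hgetq, hposc⟩ := hGF2
      have hpre := pvPreserve need l c q W brk hGF hle
      have hnn' : ∀ d, 0 ≤ pvDec need c d := by
        intro d
        unfold pvDec
        by_cases hd : d = c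
        · rw [if_pos hd, hd]; omega
        · rw [if_neg hd]; exact hnn d
      have hcl : c ∈ l := by
        rw [← hgetq]; exact List.getElem_mem hq
      have htot' : (∑ d ∈ (l.drop (q+1)).toFinset, pvDec need c d) = (f : Int) := by
        rw [pvTotStep need l c q hnn hposc hpre hcl, htot]
        push_cast; ring
      have hrec := ih (pvDec need c) (l.drop (q+1)) hnn' hpre htot'
      simp only [gRun]
      rw [hres]
      simp only
      rw [hrec]
      have hstep : aRun need l (fun d => ((l.count d : Int))) []
          = (aRun (pvDec need c) (l.drop (q+1)) (fun d => (((l.drop (q+1)).count d : Int))) []) ++ [c] := by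
        conv_lhs => rw [(List.take_append_drop (q+1) l).symm]
        rw [aRun_append]
        rw [List.take_append_drop]
        rw [pvS1 need l c q W brk hGF hle]
        have hAv2 : (fun d => ((l.count d : Int)) - (((l.take (q+1)).count d : Int)))
            = fun d => (((l.drop (q+1)).count d : Int)) := by
          funext d
          have hsp : l.count d = (l.take (q+1)).count d + (l.drop (q+1)).count d := by
            rw [← List.count_append, List.take_append_drop]
          push_cast [hsp]; ring
        rw [hAv2]
        have hinv0 : ∀ d, need d ≤ ((([] ++ [c] : List Char).count d : Int)) + (((l.drop (q+1)).count d : Int)) := by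
          intro d
          by_cases hd : d = c
          · rw [hd]
            have hp := hpre c
            unfold pvDec at hp
            rw [if_pos rfl] at hp
            have h1 : ((([] ++ [c] : List Char).count c : Int)) = 1 := by simp
            omega
          · have hp := hpre d
            unfold pvDec at hp
            rw [if_neg hd] at hp
            have h0 : (0:Int) ≤ ((([] ++ [c] : List Char).count d : Int)) := by positivity
            omega
        have hs2 := pvS2 need l c q W brk hGF (l.length - (q+1)) (q+1) rfl (le_refl _) [] hinv0
        simpa using hs2
      rw [hstep]
      rw [List.reverse_append]
      simp


theorem pvCore_cons (needf : Char → Int) (c : Char) (rest : List Char) (remf best q) :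
    pvCore needf (c :: rest) remf best q =
      (if remf c - 1 < needf c then pvBestStep needf c q best
       else pvCore needf rest (fun x => if x = c then remf x - 1 else remf x)
              (pvBestStep needf c q best) (q + 1)) := rfl
-- getD after folding inserts of (k, f k) pairs
theorem pvGetD_foldl_insert (keys : List Char) (f : Char → Int) (d : PySem.Dict Char Int) (c : Char) :
    (keys.foldl (fun d k => d.insert k (f k)) d).getD c 0
      = if c ∈ keys then f c else d.getD c 0 := by
  induction keys generalizing d with
  | nil => simp
  | cons k rest ih =>
    simp only [List.foldl_cons, ih, List.mem_cons]
    by_cases hc : c ∈ rest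
    · simp [hc]
    · simp [hc, PySem.Dict.getD_insert]
      by_cases hk : c = k <;> simp [hk]

theorem pvInit_getD (l : List Char) (c : Char) :
    (pvFreqInitA l).getD c 0 = PySem.Int.floordiv (l.count c) 2 := by
  unfold pvFreqInitA
  rw [PySem.Dict.items_counter, List.foldl_map]
  have h := pvGetD_foldl_insert (PySem.Set.ofList l)
    (fun k => PySem.Int.floordiv ((l.count k : Int)) 2) PySem.Dict.empty c
  simp only at h ⊢
  rw [h]
  by_cases hc : c ∈ PySem.Set.ofList l
  · simp [hc]
  · have hcl : c ∉ l := fun hmem => hc ((PySem.Set.mem_ofList l c).mpr hmem)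
    simp [hc, List.count_eq_zero.mpr hcl]

-- 0 < getD → get? is some getD
theorem pvGet?_of_getD_pos (d : PySem.Dict Char Int) (c : Char) (h : 0 < d.getD c 0) :
    d.get? c = some (d.getD c 0) := by
  rcases hg : d.get? c with _ | v
  · rw [PySem.Dict.getD_eq_get?_getD, hg] at h; simp at h
  · rw [PySem.Dict.getD_eq_get?_getD, hg]; rfl

-- candidate-state correspondence between A's (min_char, next_char) and the abstract best
def pvICand (n : Nat) (mc : Char) (nc : PySem.Dict Char Int) (bk : Option (Char × Nat)) : Prop :=
  match bk with
  | none => mc = '~' ∧ nc = PySem.Dict.empty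
  | some b => mc = b.1 ∧ nc.get? b.1 = some ((n : Int) - 1 - b.2) ∧
      ∀ c', c' ∈ nc.keys → b.1 ≤ c'

def pvROut (n : Nat) (out : Char × PySem.Dict Char Int) (bkF : Option (Char × Nat)) : Prop :=
  match bkF with
  | none => out.2.get? out.1 = (none : Option Int)
  | some b => out.1 = b.1 ∧ out.2.get? b.1 = some ((n : Int) - 1 - b.2)

theorem pvICand_ROut (n : Nat) (mc : Char) (nc : PySem.Dict Char Int) (bk : Option (Char × Nat))
    (h : pvICand n mc nc bk) : pvROut n (mc, nc) bk := by
  cases bk with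
  | none => unfold pvICand at h; unfold pvROut; rw [h.1, h.2]; exact PySem.Dict.get?_empty mc
  | some b0 => unfold pvICand at h; exact ⟨h.1, h.2.1⟩

theorem pvContains_of_get?_some (nc : PySem.Dict Char Int) (c : Char) (v : Int)
    (h : nc.get? c = some v) : nc.contains c = true := by
  rw [PySem.Dict.contains_eq_isSome_get?, h]; rfl

-- one candidate-update step preserves the correspondence
theorem pvICand_step (n : Nat) (freq : PySem.Dict Char Int) (ch : Char) (hch : ch ≤ '~')
    (mc : Char) (nc : PySem.Dict Char Int) (bk : Option (Char × Nat)) (hic : pvICand n mc nc bk)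
    (k : Nat) (hk : k < n) :
    pvICand n
      (if nc.contains ch = false ∧ 0 < freq.getD ch 0 then min mc ch else mc)
      (if nc.contains ch = false ∧ 0 < freq.getD ch 0 then nc.insert ch (k : Int) else nc)
      (pvBestStep (fun c => freq.getD c 0) ch (n - 1 - k) bk) := by
  have hidx : ((n : Int) - 1 - ((n - 1 - k : Nat) : Int)) = (k : Int) := by push_cast; omega
  cases bk with
  | none =>
    obtain ⟨hmc, hnc⟩ := hic
    subst hmc hnc
    by_cases hpos : 0 < freq.getD ch 0
    · rw [if_pos ⟨PySem.Dict.contains_empty ch, hpos⟩, if_pos ⟨PySem.Dict.contains_empty ch, hpos⟩]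
      unfold pvBestStep
      rw [if_pos ⟨hpos, rfl⟩]
      refine ⟨min_eq_right hch, ?_, ?_⟩
      · rw [PySem.Dict.get?_insert_self, hidx]
      · intro c' hc'
        rcases (PySem.Dict.mem_keys_insert _ _ _ _).mp hc' with h | h
        · exact le_of_eq h.symm
        · simp [PySem.Dict.keys_empty] at h
    · rw [if_neg (by intro h; exact hpos h.2), if_neg (by intro h; exact hpos h.2)]
      unfold pvBestStep
      rw [if_neg (by intro h; exact hpos h.1)]
      exact ⟨rfl, rfl⟩
  | some b0 =>
    obtain ⟨hmc, hget, hmin⟩ := hic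
    subst hmc
    by_cases hin : nc.contains ch = true
    · have hcond : ¬(nc.contains ch = false ∧ 0 < freq.getD ch 0) := by
        intro h; rw [hin] at h; exact absurd h.1 (by simp)
      rw [if_neg hcond, if_neg hcond]
      unfold pvBestStep
      have hle : b0.1 ≤ ch := hmin ch ((PySem.Dict.contains_iff_mem_keys nc ch).mp hin)
      rw [if_neg (by intro h; exact absurd (of_decide_eq_true h.2) (not_lt.mpr hle))]
      exact ⟨rfl, hget, hmin⟩
    · have hin' : nc.contains ch = false := by simpa using hin
      by_cases hpos : 0 < freq.getD ch 0
      · rw [if_pos ⟨hin', hpos⟩, if_pos ⟨hin', hpos⟩]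
        have hne : ch ≠ b0.1 := by
          intro h
          have hc : nc.contains ch = true := pvContains_of_get?_some nc ch _ (by rw [h]; exact hget)
          rw [hin'] at hc; cases hc
        unfold pvBestStep
        by_cases hlt : ch < b0.1
        · rw [if_pos ⟨hpos, by simpa using hlt⟩]
          refine ⟨min_eq_right (le_of_lt hlt), ?_, ?_⟩
          · rw [PySem.Dict.get?_insert_self, hidx]
          · intro c' hc'
            rcases (PySem.Dict.mem_keys_insert _ _ _ _).mp hc' with h | h
            · exact le_of_eq h.symm
            · exact le_of_lt (lt_of_lt_of_le hlt (hmin c' h))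
        · rw [if_neg (by intro h; exact hlt (by simpa using h.2))]
          have hle : b0.1 ≤ ch := le_of_not_gt hlt
          refine ⟨min_eq_left hle, ?_, ?_⟩
          · rw [PySem.Dict.get?_insert, if_neg (fun h => hne h.symm), hget]
          · intro c' hc'
            rcases (PySem.Dict.mem_keys_insert _ _ _ _).mp hc' with h | h
            · rw [h]; exact hle
            · exact hmin c' h
      · rw [if_neg (by intro h; exact hpos h.2), if_neg (by intro h; exact hpos h.2)]
        unfold pvBestStep
        rw [if_neg (by intro h; exact hpos h.1)]
        exact ⟨rfl, hget, hmin⟩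

theorem pvScanA_cons (t : List Char) (freq : PySem.Dict Char Int) (i : Int) (rest : List Int)
    (lf mc nc) :
    pvScanA t freq (i :: rest) lf mc nc =
      (if (lf.modify (PySem.List.pyGetD t i ' ') 0 (· - 1)).getD (PySem.List.pyGetD t i ' ') 0
            < freq.getD (PySem.List.pyGetD t i ' ') 0
       then ((if nc.contains (PySem.List.pyGetD t i ' ') = false ∧ 0 < freq.getD (PySem.List.pyGetD t i ' ') 0
              then min mc (PySem.List.pyGetD t i ' ') else mc),
             (if nc.contains (PySem.List.pyGetD t i ' ') = false ∧ 0 < freq.getD (PySem.List.pyGetD t i ' ') 0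
              then nc.insert (PySem.List.pyGetD t i ' ') i else nc))
       else pvScanA t freq rest (lf.modify (PySem.List.pyGetD t i ' ') 0 (· - 1))
             (if nc.contains (PySem.List.pyGetD t i ' ') = false ∧ 0 < freq.getD (PySem.List.pyGetD t i ' ') 0
              then min mc (PySem.List.pyGetD t i ' ') else mc)
             (if nc.contains (PySem.List.pyGetD t i ' ') = false ∧ 0 < freq.getD (PySem.List.pyGetD t i ' ') 0
              then nc.insert (PySem.List.pyGetD t i ' ') i else nc)) := rfl

theorem pvScanA_eq (cs : List Char) (hDom : ∀ c ∈ cs, c ≤ '~') (m : Nat) (hm : m ≤ cs.length)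
    (freq : PySem.Dict Char Int) :
    ∀ (k : Nat), k ≤ m → ∀ (lf : PySem.Dict Char Int) (remf : Char → Int),
      (∀ c, lf.getD c 0 = remf c) → ∀ (mc : Char) (nc : PySem.Dict Char Int)
      (bk : Option (Char × Nat)), pvICand cs.length mc nc bk →
    pvROut cs.length
      (pvScanA (cs.take m) freq (PySem.List.pyRange ((k : Int) - 1) (-1) (-1)) lf mc nc)
      (pvCore (fun c => freq.getD c 0) ((cs.take k).reverse) remf bk (cs.length - k)) := by
  intro k
  induction k with
  | zero =>
    intro hk lf remf hrem mc nc bk hic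
    rw [show ((0 : Nat) : Int) - 1 = (-1 : Int) by ring]
    rw [PySem.List.pyRange_neg_one_eq_nil (le_refl _)]
    simp only [List.take_zero, List.reverse_nil]
    exact pvICand_ROut _ _ _ _ hic
  | succ k ih =>
    intro hk lf remf hrem mc nc bk hic
    have hkm : k < m := by omega
    have hkn : k < cs.length := by omega
    rw [show ((k + 1 : Nat) : Int) - 1 = (k : Int) by push_cast; ring]
    rw [PySem.List.pyRange_neg_one_cons (by omega : (-1 : Int) < (k : Int))]
    have hchar : PySem.List.pyGetD (cs.take m) (k : Int) ' ' = cs[k] := by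
      rw [PySem.List.pyGetD_eq_getElem (cs.take m) ' ' (by omega)
            (by rw [List.length_take]; push_cast; omega)]
      simp [List.getElem_take]
    rw [pvScanA_cons, hchar]
    have hlist : (cs.take (k+1)).reverse = cs[k] :: (cs.take k).reverse := by
      rw [List.take_succ, List.getElem?_eq_getElem hkn]
      simp
    rw [hlist, pvCore_cons]
    have hrem' : ∀ x, (lf.modify cs[k] 0 (· - 1)).getD x 0
        = (fun x => if x = cs[k] then remf x - 1 else remf x) x := by
      intro x; rw [PySem.Dict.getD_modify]; by_cases hx : x = cs[k] <;> simp [hx, hrem]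
    have hq0 : cs.length - (k+1) = cs.length - 1 - k := by omega
    have hstep := pvICand_step cs.length freq cs[k] (hDom _ (List.getElem_mem hkn)) mc nc bk hic k hkn
    rw [hq0]
    have hb1 : (lf.modify cs[k] 0 (· - 1)).getD cs[k] 0 = remf cs[k] - 1 := by
      simpa using hrem' cs[k]
    by_cases hbr : remf cs[k] - 1 < freq.getD cs[k] 0
    · rw [if_pos (by rw [hb1]; exact hbr), if_pos hbr]
      exact pvICand_ROut _ _ _ _ hstep
    · rw [if_neg (by rw [hb1]; exact hbr), if_neg hbr]
      rw [show (cs.length - 1 - k) + 1 = cs.length - k from by omega]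
      exact ih (by omega) _ _ hrem' _ _ _ hstep

theorem pvLoopA_eq : ∀ (fuel : Nat) (t : List Char), (∀ c ∈ t, c ≤ '~') →
    ∀ (freq : PySem.Dict Char Int) (sol : List Char),
    pvLoopA fuel t freq sol
      = match gRun (fun d => freq.getD d 0) fuel t.reverse with
        | some o => some (sol ++ o)
        | none => none := by
  intro fuel
  induction fuel with
  | zero =>
    intro t hDom freq sol
    simp [pvLoopA, gRun]
  | succ fuel ih =>
    intro t hDom freq sol
    have hA := pvScanA_eq t hDom t.length (le_refl _) freq t.length (le_refl _)
      (PySem.Dict.counter t) (fun c => ((t.count c : Int)))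
      (fun c => PySem.Dict.getD_counter t c) '~' PySem.Dict.empty none ⟨rfl, rfl⟩
    rw [List.take_length] at hA
    have hremf : (fun c => ((t.count c : Int))) = fun d => ((t.reverse.count d : Int)) := by
      funext d; rw [List.count_reverse]
    rw [hremf, Nat.sub_self] at hA
    have hL : pvLoopA (fuel+1) t freq sol =
        (match (pvScanA t freq (PySem.List.pyRange ((t.length : Int) - 1) (-1) (-1))
            (PySem.Dict.counter t) '~' PySem.Dict.empty).2.get?
          (pvScanA t freq (PySem.List.pyRange ((t.length : Int) - 1) (-1) (-1))
            (PySem.Dict.counter t) '~' PySem.Dict.empty).1,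
          freq.get?
          (pvScanA t freq (PySem.List.pyRange ((t.length : Int) - 1) (-1) (-1))
            (PySem.Dict.counter t) '~' PySem.Dict.empty).1 with
         | some j, some v =>
             pvLoopA fuel (PySem.List.slice t none (some j))
               (freq.insert (pvScanA t freq (PySem.List.pyRange ((t.length : Int) - 1) (-1) (-1))
                 (PySem.Dict.counter t) '~' PySem.Dict.empty).1 (v - 1))
               (sol ++ [(pvScanA t freq (PySem.List.pyRange ((t.length : Int) - 1) (-1) (-1))
                 (PySem.Dict.counter t) '~' PySem.Dict.empty).1])
         | _, _ => none) := rfl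
    rw [hL]
    rcases h2 : pvScanA t freq (PySem.List.pyRange ((t.length : Int) - 1) (-1) (-1))
        (PySem.Dict.counter t) '~' PySem.Dict.empty with ⟨mc, nc⟩
    rw [h2] at hA
    rcases hres : pvCore (fun d => freq.getD d 0) t.reverse (fun d => ((t.reverse.count d : Int))) none 0
        with _ | ⟨c, q⟩
    · rw [hres] at hA
      unfold pvROut at hA
      simp only at hA
      rw [hA]
      simp only [gRun]
      rw [hres]
    · rw [hres] at hA
      unfold pvROut at hA
      simp only at hA
      obtain ⟨hmc, hnc⟩ := hA
      subst hmc
      obtain ⟨W, brk, hGF⟩ := pvCore_GF (fun d => freq.getD d 0) t.reverse t.reverse.length 0 rfl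
        (Nat.zero_le _) none (fun b hb => nomatch hb)
        (fun j h hj _ => absurd hj (Nat.not_lt_zero j))
        (fun j hj => absurd hj (Nat.not_lt_zero j))
        mc q (by simpa only [List.drop_zero] using hres)
      obtain ⟨hqW, hWlen, hNB, hbrk, hnobrk, hmin, hfirst, hq, hgetq, hposc⟩ := hGF
      have hqlen : q < t.length := by
        rw [List.length_reverse] at hq; exact hq
      have hfget : freq.get? mc = some (freq.getD mc 0) := pvGet?_of_getD_pos freq mc hposc
      rw [hnc, hfget]
      simp only
      have hslice : PySem.List.slice t none (some ((t.length : Int) - 1 - (q : Int)))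
          = t.take (t.length - 1 - q) := by
        rw [PySem.List.slice_to (xs := t) (b := (t.length : Int) - 1 - (q : Int)) (by push_cast; omega)]
        have htn : ((t.length : Int) - 1 - (q : Int)).toNat = t.length - 1 - q := by omega
        rw [htn]
      rw [hslice]
      have hDom' : ∀ c' ∈ t.take (t.length - 1 - q), c' ≤ '~' :=
        fun c' hc' => hDom c' (List.mem_of_mem_take hc')
      rw [ih (t.take (t.length - 1 - q)) hDom' (freq.insert mc (freq.getD mc 0 - 1)) (sol ++ [mc])]
      simp only [gRun]
      rw [hres]
      simp only
      have hrev : (t.take (t.length - 1 - q)).reverse = t.reverse.drop (q + 1) := by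
        have h1 : t.reverse.drop (t.length - (t.length - 1 - q)) = (t.take (t.length - 1 - q)).reverse := by
          rw [List.reverse_take]
        have h2' : t.length - (t.length - 1 - q) = q + 1 := by omega
        rw [h2'] at h1
        exact h1.symm
      have hfD : (fun d => (freq.insert mc (freq.getD mc 0 - 1)).getD d 0)
          = pvDec (fun d => freq.getD d 0) mc := by
        funext d
        rw [PySem.Dict.getD_insert]
        unfold pvDec
        by_cases hd : d = mc <;> simp [hd]
      rw [hrev, hfD]
      rcases hg : gRun (pvDec (fun d => freq.getD d 0) mc) fuel (t.reverse.drop (q + 1)) with _ | o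
      · simp
      · simp

theorem pvPopB_eq (needD availD : PySem.Dict Char Int) (needf availf : Char → Int)
    (hn : ∀ d, PySem.Int.floordiv (needD.getD d 0) 2 = needf d) (ha : ∀ d, availD.getD d 0 = availf d) (c : Char) :
    ∀ (S : List Char) (takenD : PySem.Dict Char Int),
    (∀ d, takenD.getD d 0 = ((S.count d : Int))) →
    (pvPopB needD availD c takenD S).2 = aPop needf availf c S ∧
    (∀ d, (pvPopB needD availD c takenD S).1.getD d 0 = (((aPop needf availf c S).count d : Int))) := by
  intro S
  induction S with
  | nil =>
    intro takenD ht
    refine ⟨by simp [pvPopB, aPop], ?_⟩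
    intro d
    simpa [pvPopB, aPop] using ht d
  | cons t rest ih =>
    intro takenD ht
    simp only [pvPopB, aPop]
    have hcond : (c < t ∧ PySem.Int.floordiv (needD.getD t 0) 2 ≤ takenD.getD t 0 - 1 + availD.getD t 0)
        ↔ (c < t ∧ needf t ≤ (((t :: rest).count t : Int)) - 1 + availf t) := by
      rw [hn, ha, ht]
    by_cases hc : c < t ∧ needf t ≤ (((t :: rest).count t : Int)) - 1 + availf t
    · rw [if_pos (hcond.mpr hc), if_pos hc]
      apply ih
      intro d
      rw [PySem.Dict.getD_modify]
      by_cases hd : d = t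
      · subst hd
        rw [if_pos rfl, ht, List.count_cons_self]
        push_cast
        ring
      · rw [if_neg hd, ht, pvCount_cons_ne t d rest (fun h => hd h.symm)]
    · rw [if_neg (fun h => hc (hcond.mp h)), if_neg hc]
      exact ⟨rfl, ht⟩

theorem pvLoopB2_eq (needD : PySem.Dict Char Int) (needf : Char → Int)
    (hn : ∀ d, PySem.Int.floordiv (needD.getD d 0) 2 = needf d) :
    ∀ (v : List Char) (availD takenD : PySem.Dict Char Int) (st : List Char)
      (availf : Char → Int),
    (∀ d, availD.getD d 0 = availf d) →
    (∀ d, takenD.getD d 0 = ((st.count d : Int))) →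
    pvLoopB2 needD v availD takenD st = aRun needf v availf st := by
  intro v
  induction v with
  | nil => intro _ _ st _ _ _; rfl
  | cons x v ih =>
    intro availD takenD st availf ha ht
    simp only [pvLoopB2, aRun]
    have ha' : ∀ d, (availD.modify x 0 (· - 1)).getD d 0
        = (if d = x then availf d - 1 else availf d) := by
      intro d
      rw [PySem.Dict.getD_modify]
      by_cases hd : d = x
      · rw [if_pos hd, if_pos hd, ha, hd]
      · rw [if_neg hd, if_neg hd, ha]
    by_cases hp : ((st.count x : Int)) < needf x
    · rw [if_pos (by rw [ht, hn]; exact hp), if_pos hp]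
      obtain ⟨hstk, htk⟩ := pvPopB_eq needD (availD.modify x 0 (· - 1)) needf
          (fun d => if d = x then availf d - 1 else availf d) hn ha' x st takenD ht
      rw [hstk]
      apply ih
      · exact ha'
      · intro d
        rw [PySem.Dict.getD_modify]
        by_cases hd : d = x
        · subst hd
          rw [if_pos rfl, htk, List.count_cons_self]
          push_cast
          ring
        · rw [if_neg hd, htk, pvCount_cons_ne x d _ (fun h => hd h.symm)]
    · rw [if_neg (by rw [ht, hn]; exact hp), if_neg hp]
      exact ih _ _ _ _ ha' ht

theorem pvHalfCast (m : Nat) : PySem.Int.floordiv ((m : Nat) : Int) 2 = ((m / 2 : Nat) : Int) := by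
  rw [PySem.Int.floordiv_eq_ediv_of_pos (by omega)]
  omega

theorem pvSumIte (p : Char → Prop) [DecidablePred p] :
    ∀ (l : List Char), (l.map (fun d => if p d then (1:Nat) else 0)).sum
      = l.countP (fun d => decide (p d)) := by
  intro l
  induction l with
  | nil => simp
  | cons x l ih =>
    simp only [List.map_cons, List.sum_cons, List.countP_cons, ih]
    by_cases hx : p x <;> simp [hx] <;> omega

theorem pvOddCard (cs : List Char) :
    (∑ d ∈ cs.toFinset, (cs.count d % 2))
      = (PySem.Set.ofList cs).countP (fun c => cs.count c % 2 == 1) := by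
  have h1 : ∀ d ∈ cs.toFinset, cs.count d % 2 = (if cs.count d % 2 = 1 then 1 else 0) := by
    intro d _
    rcases Nat.mod_two_eq_zero_or_one (cs.count d) with h | h <;> simp [h]
  rw [Finset.sum_congr rfl h1]
  have hdf : cs.dedup.toFinset = cs.toFinset := by
    ext a
    simp [List.mem_toFinset, List.mem_dedup]
  rw [← hdf]
  rw [List.sum_toFinset _ (List.nodup_dedup cs)]
  rw [pvSumIte (fun d => cs.count d % 2 = 1) cs.dedup]
  have hperm : (PySem.Set.ofList cs).Perm cs.dedup := by
    apply (List.perm_ext_iff_of_nodup (PySem.Set.nodup_ofList cs) (List.nodup_dedup cs)).mpr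
    intro a
    rw [PySem.Set.mem_ofList, List.mem_dedup]
  rw [← hperm.countP_eq]
  apply List.countP_congr
  intro x _
  by_cases h : cs.count x % 2 = 1 <;> simp [h]

theorem pvSumHalf (cs : List Char)
    (hPre : ((PySem.Set.ofList cs).countP (fun c => cs.count c % 2 == 1)) ≤ 1) :
    ∑ d ∈ cs.toFinset, (cs.count d / 2) = cs.length / 2 := by
  have hn : ∑ d ∈ cs.toFinset, cs.count d = cs.length := List.sum_toFinset_count_eq_length cs
  have hsum : cs.length = 2 * (∑ d ∈ cs.toFinset, (cs.count d / 2)) + ∑ d ∈ cs.toFinset, (cs.count d % 2) := by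
    conv_lhs => rw [← hn]
    rw [Finset.mul_sum, ← Finset.sum_add_distrib]
    exact Finset.sum_congr rfl (fun d _ => by omega)
  have hodd := pvOddCard cs
  omega

theorem pv_final (s : String) (hDom : Dom_reverse_shuffle_merge s)
    (hPre : Pre_reverse_shuffle_merge s) :
    reverse_shuffle_merge s = reverse_shuffle_merge_alt s := by
  unfold Pre_reverse_shuffle_merge at hPre
  have hD : ∀ c ∈ s.toList, c ≤ '~' := by
    intro c hc
    have hch : pvDomChar c = true := by
      unfold Dom_reverse_shuffle_merge pvDomStr at hDom
      exact List.all_eq_true.mp hDom c hc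
    have hle : c.toNat ≤ 126 := by
      unfold pvDomChar at hch
      simp only [Bool.or_eq_true, Bool.and_eq_true, decide_eq_true_eq, beq_iff_eq] at hch
      rcases hch with ((⟨h1, h2⟩ | h) | h) | h <;> omega
    rw [Char.le_def, UInt32.le_iff_toBitVec_le, BitVec.le_def]
    show c.val.toNat ≤ 126
    exact hle
  have hNF : ∀ d, (pvFreqInitA s.toList).getD d 0 = (((s.toList.count d / 2 : Nat)) : Int) := by
    intro d
    rw [pvInit_getD, pvHalfCast]
  have hnn : ∀ d, 0 ≤ (pvFreqInitA s.toList).getD d 0 := by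
    intro d; rw [hNF]; positivity
  have hle2 : ∀ d, (pvFreqInitA s.toList).getD d 0 ≤ ((s.toList.reverse.count d : Int)) := by
    intro d
    rw [hNF, List.count_reverse]
    have h := Nat.div_le_self (s.toList.count d) 2
    exact_mod_cast h
  have hfuel : (PySem.Int.floordiv ((s.toList.length : Int)) 2).toNat = s.toList.length / 2 := by
    rw [pvHalfCast]
    omega
  have htot : (∑ d ∈ s.toList.reverse.toFinset, (pvFreqInitA s.toList).getD d 0)
      = ((s.toList.length / 2 : Nat) : Int) := by
    rw [List.toFinset_reverse]
    rw [Finset.sum_congr rfl (fun d _ => hNF d)]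
    exact_mod_cast pvSumHalf s.toList hPre
  have hmain := pvMain (s.toList.length / 2) (fun d => (pvFreqInitA s.toList).getD d 0)
      s.toList.reverse hnn hle2 htot
  have hA := pvLoopA_eq (PySem.Int.floordiv ((s.toList.length : Int)) 2).toNat s.toList hD
      (pvFreqInitA s.toList) []
  rw [hfuel, hmain] at hA
  have hB : pvLoopB2 (PySem.Dict.counter s.toList) s.toList.reverse (PySem.Dict.counter s.toList)
        PySem.Dict.empty []
      = aRun (fun d => (pvFreqInitA s.toList).getD d 0) s.toList.reverse
          (fun d => ((s.toList.reverse.count d : Int))) [] := by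
    apply pvLoopB2_eq
    · intro d; rw [PySem.Dict.getD_counter, pvInit_getD]
    · intro d; rw [PySem.Dict.getD_counter, List.count_reverse]
    · intro d
      rw [PySem.Dict.getD_eq_get?_getD, PySem.Dict.get?_empty]
      simp
  show (match pvLoopA (PySem.Int.floordiv ((s.toList.length : Int)) 2).toNat s.toList
        (pvFreqInitA s.toList) [] with
    | some sol => String.ofList sol
    | none => "")
    = String.ofList (pvLoopB2 (PySem.Dict.counter s.toList) s.toList.reverse
        (PySem.Dict.counter s.toList) PySem.Dict.empty []).reverse
  rw [hfuel, hA, hB]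
  simp

-- ===== VERDICT (by name: the statement is the Claim_ definition above) =====
theorem reverse_shuffle_merge_spec : Claim_equal_reverse_shuffle_merge := by
  intro s hDom hPre
  unfold Spec_reverse_shuffle_merge
  exact pv_final s hDom hPre
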